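-- pv_equiv track=rewrite | github.com/reynolkb/cryptohermitsnft | backend/nftInitializeDatabase.py | PermutationsAreUnique
-- ===== SOURCE A (Python) =====
-- def PermutationsAreUnique(permutations):
--     """
--     Validate that each permutation in permutations is unique.
--       permutations = [ [3,2,8,1,4], [2,4,7,1,3], ...]
--     """
--     # A set() is a unique set of keys.  Like a dictionary of keys without values.
--     permutationStrings = set()
--
--     # Add each permutation (as a string) to permutationStrings.  False will be returned if a duplicate is encountered.
--     for permutation in permutations:
--         permutationString = ""
--         for p in permutation:
--             permutationString += str(p) + "_"
--         if permutationString in permutationStrings: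
--             # Duplicate permutation, not unique.
--             return False
--         permutationStrings.add(permutationString)
--
--     # All permutations are unique.
--     return True
-- ===== SOURCE B (Python) =====
-- def PermutationsAreUnique(permutations):
--     keys = sorted("".join(str(p) + "_" for p in perm) for perm in permutations)
--     return all(x != y for x, y in zip(keys, keys[1:]))
-- ===== Notes on version B (the rewrite author's own statement) =====
-- stated objective: alternative
-- what changed: B sorts the string keys and checks that no two adjacent sorted keys are equal, replacing A's incremental hash-set membership loop with early return by a sort-then-scan with no set at all.
import Mathlib
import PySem

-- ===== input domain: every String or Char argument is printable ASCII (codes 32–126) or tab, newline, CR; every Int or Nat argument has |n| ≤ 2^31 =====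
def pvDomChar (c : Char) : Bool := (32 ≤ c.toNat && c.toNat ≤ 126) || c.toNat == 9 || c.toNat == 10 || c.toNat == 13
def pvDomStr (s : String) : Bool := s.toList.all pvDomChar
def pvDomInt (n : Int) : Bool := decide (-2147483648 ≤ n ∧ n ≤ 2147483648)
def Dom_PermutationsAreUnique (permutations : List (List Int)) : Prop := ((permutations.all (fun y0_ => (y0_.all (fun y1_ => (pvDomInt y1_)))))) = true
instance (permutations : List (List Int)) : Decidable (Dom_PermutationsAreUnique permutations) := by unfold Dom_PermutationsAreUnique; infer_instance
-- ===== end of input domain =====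

-- B replaces A's incremental seen-set loop (early return on first duplicate) by sorting the
-- string keys and checking that no two adjacent sorted keys are equal (objective: alternative).

-- ===== PORT A =====
-- inner loop: permutationString = ""; for p in permutation: permutationString += str(p) + "_"
def pvKeyA (permutation : List Int) : String :=
  permutation.foldl (fun s p => s ++ PySem.Int.toStr p ++ "_") ""

-- outer loop with the early 'return False'
def pvLoopA (seen : PySem.Set String) (rest : List (List Int)) : Bool :=
  match rest with
  | [] => true
  | permutation :: rest =>
    let permutationString := pvKeyA permutation
    if PySem.Set.contains seen permutationString then false
    else pvLoopA (PySem.Set.add seen permutationString) rest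

def PermutationsAreUnique (permutations : List (List Int)) : Bool :=
  pvLoopA PySem.Set.empty permutations

-- ===== PORT B =====
-- "".join(str(p) + "_" for p in perm)
def pvKeyB (perm : List Int) : String :=
  PySem.Str.join "" (perm.map (fun p => PySem.Int.toStr p ++ "_"))

-- keys = sorted(... for perm in permutations); all(x != y for x, y in zip(keys, keys[1:]))
def PermutationsAreUnique_alt (permutations : List (List Int)) : Bool :=
  let keys := PySem.List.sorted (permutations.map pvKeyB) (fun k => k) false
  (keys.zip (PySem.List.slice keys (some 1) none)).all (fun p => p.1 != p.2)

-- ===== PRECONDITION & SPEC =====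
def Spec_PermutationsAreUnique (permutations : List (List Int)) (out : Bool) : Prop := out = PermutationsAreUnique_alt permutations
instance (permutations : List (List Int)) (out : Bool) : Decidable (Spec_PermutationsAreUnique permutations out) := by unfold Spec_PermutationsAreUnique; infer_instance

-- ===== CLAIM (what is proved, stated in full; the proofs are below) =====
def Claim_equal_PermutationsAreUnique : Prop := ∀ (permutations : List (List Int)), Dom_PermutationsAreUnique permutations → Spec_PermutationsAreUnique permutations (PermutationsAreUnique permutations)

-- ===== LEMMAS AND PROOFS =====

-- '' .join over List Char is flatten
theorem charsJoin_nil_left (l : List (List Char)) : PySem.Chars.join [] l = l.flatten := by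
  simp [PySem.Chars.join, List.intercalate]
  induction l with
  | nil => simp
  | cons x xs ih => cases xs <;> simp_all [List.intersperse]

-- the two key builders agree
theorem pvKey_eq (perm : List Int) : pvKeyA perm = pvKeyB perm := by
  have h : ∀ (l : List Int) (a : String),
      (l.foldl (fun s p => s ++ PySem.Int.toStr p ++ "_") a).toList
        = a.toList ++ (l.map (fun p => (PySem.Int.toStr p ++ "_").toList)).flatten := by
    intro l
    induction l with
    | nil => intro a; simp
    | cons x xs ih =>
      intro a
      simp [List.foldl_cons, ih, String.toList_append]
  apply String.toList_injective
  simp [pvKeyA, pvKeyB, PySem.Str.join, charsJoin_nil_left, h, String.toList_append,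
        Function.comp_def]

-- A's loop returns true iff the keys are pairwise distinct and avoid the seen set
theorem pvLoopA_iff (rest : List (List Int)) (seen : PySem.Set String) :
    pvLoopA seen rest = true ↔
      (rest.map pvKeyA).Nodup ∧ ∀ k ∈ rest.map pvKeyA, k ∉ seen := by
  induction rest generalizing seen with
  | nil => simp [pvLoopA]
  | cons perm rest ih =>
    simp only [pvLoopA, List.map_cons, List.nodup_cons, List.mem_cons]
    by_cases h : pvKeyA perm ∈ seen
    · simp [h]
    · simp [h, ih, List.mem_map]
      aesop

-- the adjacent-pair scan over zip(l, l[1:]) is IsChain (≠)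
theorem zip_tail_all_ne {α : Type} [DecidableEq α] (l : List α) :
    ((l.zip l.tail).all (fun p => p.1 != p.2) = true) ↔ l.IsChain (· ≠ ·) := by
  induction l with
  | nil => simp
  | cons x xs ih =>
    cases xs with
    | nil => simp
    | cons y ys =>
      simp_all [List.isChain_cons_cons]

-- a ≤-sorted list with distinct adjacent elements has no duplicates at all
theorem nodup_of_pairwise_le_chain_ne {α : Type} [LinearOrder α] (l : List α)
    (hle : l.Pairwise (· ≤ ·)) (hne : l.IsChain (· ≠ ·)) : l.Nodup := by
  have hlt : l.IsChain (· < ·) := by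
    induction l with
    | nil => exact List.isChain_nil
    | cons x xs ih =>
      cases xs with
      | nil => exact List.isChain_singleton x
      | cons y ys =>
        rw [List.isChain_cons_cons] at *
        rcases hne with ⟨hxy, hne⟩
        rw [List.pairwise_cons] at hle
        exact ⟨lt_of_le_of_ne (hle.1 y (by simp)) hxy, ih hle.2 hne⟩
  exact (List.isChain_iff_pairwise.mp hlt).imp ne_of_lt

-- ===== VERDICT (by name: the statement is the Claim_ definition above) =====
theorem PermutationsAreUnique_spec : Claim_equal_PermutationsAreUnique := by
  intro permutations _
  unfold Spec_PermutationsAreUnique PermutationsAreUnique PermutationsAreUnique_alt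
  simp only [PySem.List.slice_from_one]
  have hmap : permutations.map pvKeyB = permutations.map pvKeyA := by
    simp [pvKey_eq]
  simp only [hmap]
  set ks := permutations.map pvKeyA with hks
  set s := PySem.List.sorted ks (fun k => k) false with hs
  rw [Bool.eq_iff_iff, pvLoopA_iff, zip_tail_all_ne]
  have hperm : s.Perm ks := PySem.List.sorted_perm ks _ _
  have hpw : s.Pairwise (· ≤ ·) := by
    have := PySem.List.sorted_pairwise ks (fun k => k)
    simpa using this
  constructor
  · rintro ⟨hn, -⟩
    exact (hperm.nodup_iff.mpr hn).isChain
  · intro hch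
    refine ⟨hperm.nodup_iff.mp (nodup_of_pairwise_le_chain_ne s hpw hch), by simp [PySem.Set.empty]⟩
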